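-- pv_equiv track=rewrite | github.com/lesleslie/crackerjack | crackerjack/managers/test_manager_backup.py | _extract_failure_lines
-- ===== SOURCE A (Python) =====
-- def _extract_failure_lines(output: str) -> list[str]:
--     lines = output.split("\n")
--     in_failure_section = False
--     failure_lines: list[str] = []
--     for line in lines:
--         if "FAILURES" in line or "ERRORS" in line:
--             in_failure_section = True
--         elif in_failure_section and line.startswith(" = "):
--             break
--         elif in_failure_section:
--             failure_lines.append(line)
--
--     return failure_lines
-- ===== SOURCE B (Python) =====
-- def _extract_failure_lines(output: str) -> list[str]:
--     lines = output.split("\n")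
--     start = None
--     for i, line in enumerate(lines):
--         if "FAILURES" in line or "ERRORS" in line:
--             start = i
--             break
--     if start is None:
--         return []
--     failure_lines: list[str] = []
--     for line in lines[start + 1:]:
--         if "FAILURES" in line or "ERRORS" in line:
--             continue
--         if line.startswith(" = "):
--             break
--         failure_lines.append(line)
--     return failure_lines
-- ===== Notes on version B (the rewrite author's own statement) =====
-- stated objective: simpler
-- what changed: Replaced the single boolean state-machine pass with a locate-then-collect decomposition: first find the index of the first FAILURES/ERRORS marker line (returning [] if none), then collect lines from the rest, skipping interior marker lines and stopping at the first ' = ' terminator.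
import Mathlib
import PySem

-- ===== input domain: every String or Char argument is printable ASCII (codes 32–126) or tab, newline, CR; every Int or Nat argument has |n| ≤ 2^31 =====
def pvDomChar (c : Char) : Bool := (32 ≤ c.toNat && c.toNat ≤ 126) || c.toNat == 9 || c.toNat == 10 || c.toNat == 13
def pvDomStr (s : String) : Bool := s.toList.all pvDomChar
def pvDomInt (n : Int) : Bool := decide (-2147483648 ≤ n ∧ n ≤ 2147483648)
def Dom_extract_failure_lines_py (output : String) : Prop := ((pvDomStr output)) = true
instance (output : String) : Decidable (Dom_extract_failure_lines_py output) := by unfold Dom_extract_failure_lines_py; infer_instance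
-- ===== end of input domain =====

-- B replaces A's one-pass boolean state machine with a locate-then-collect decomposition (objective: simpler).

-- ===== PORT A =====
-- A's single pass: state (in_failure_section, failure_lines), break modelled by returning acc
def extractA_loop : List String → Bool → List String → List String
  | [], _, acc => acc
  | l :: ls, inSec, acc =>
    if PySem.Str.isIn "FAILURES" l || PySem.Str.isIn "ERRORS" l then
      extractA_loop ls true acc
    else if inSec && PySem.Str.startswith l " = " then acc
    else if inSec then extractA_loop ls inSec (acc ++ [l])
    else extractA_loop ls inSec acc

def extract_failure_lines_py (output : String) : List String :=
  extractA_loop ((PySem.Str.split? output "\n").getD []) false []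

-- ===== PORT B =====
-- first loop of B: index of the first marker line (start), none if absent
def findMarkerIdxB : List String → Nat → Option Nat
  | [], _ => none
  | l :: ls, i =>
    if PySem.Str.isIn "FAILURES" l || PySem.Str.isIn "ERRORS" l then some i
    else findMarkerIdxB ls (i + 1)

-- second loop of B over lines[start+1:]: continue past markers, break at ' = ', else append
def collectB : List String → List String → List String
  | [], acc => acc
  | l :: ls, acc =>
    if PySem.Str.isIn "FAILURES" l || PySem.Str.isIn "ERRORS" l then collectB ls acc
    else if PySem.Str.startswith l " = " then acc
    else collectB ls (acc ++ [l])

def extract_failure_lines_py_alt (output : String) : List String :=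
  let lines := (PySem.Str.split? output "\n").getD []
  match findMarkerIdxB lines 0 with
  | none => []
  | some start => collectB (lines.drop (start + 1)) []

-- ===== PRECONDITION & SPEC =====
def Spec_extract_failure_lines_py (output : String) (out : List String) : Prop := out = extract_failure_lines_py_alt output
instance (output : String) (out : List String) : Decidable (Spec_extract_failure_lines_py output out) := by unfold Spec_extract_failure_lines_py; infer_instance

-- ===== CLAIM (what is proved, stated in full; the proofs are below) =====
def Claim_equal_extract_failure_lines_py : Prop := ∀ (output : String), Dom_extract_failure_lines_py output → Spec_extract_failure_lines_py output (extract_failure_lines_py output)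

-- ===== LEMMAS AND PROOFS =====

-- In the section (inSec = true), A's loop is exactly B's collect loop.
theorem extractA_loop_true (ls : List String) (acc : List String) :
    extractA_loop ls true acc = collectB ls acc := by
  induction ls generalizing acc with
  | nil => rfl
  | cons l ls ih =>
    simp only [extractA_loop, collectB, Bool.true_and]
    split_ifs <;> simp [ih]

theorem findMarkerIdxB_shift (ls : List String) (i : Nat) :
    findMarkerIdxB ls (i + 1) = (findMarkerIdxB ls i).map (· + 1) := by
  induction ls generalizing i with
  | nil => rfl
  | cons l ls ih =>
    simp only [findMarkerIdxB]
    split_ifs with h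
    · rfl
    · exact ih (i + 1)

-- Before any marker, A's loop equals B's locate-then-collect.
theorem extractA_loop_false (ls : List String) :
    extractA_loop ls false [] =
      (match findMarkerIdxB ls 0 with
       | none => []
       | some start => collectB (ls.drop (start + 1)) []) := by
  induction ls with
  | nil => rfl
  | cons l ls ih =>
    simp only [extractA_loop, findMarkerIdxB, Bool.false_and, Bool.false_eq_true, if_false]
    split_ifs with h
    · simp [extractA_loop_true]
    · rw [ih, findMarkerIdxB_shift]
      cases findMarkerIdxB ls 0 <;> simp

-- ===== VERDICT (by name: the statement is the Claim_ definition above) =====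
theorem extract_failure_lines_py_spec : Claim_equal_extract_failure_lines_py := by
  intro output _
  unfold Spec_extract_failure_lines_py extract_failure_lines_py extract_failure_lines_py_alt
  exact extractA_loop_false _
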